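-- pv_equiv track=rewrite | github.com/tina-wen/xtuner | mojo_opset/backends/ttx/kernels/npu/layernorm.py | layer_norm_fwd_heuristics
-- ===== SOURCE A (Python) =====
-- COL_BLOCKING_THRESHOLD = 2048
--
-- TOKEN_BLOCK_SIZE_TABLE = {
--     2048: 4,
--     1024: 8,
--     512: 10,
--     256: 18,
--     128: 24,
-- }
--
-- def layer_norm_fwd_heuristics(args):
--     hidden_dim = args["n_cols"]
--     if hidden_dim <= COL_BLOCKING_THRESHOLD:
--         if hidden_dim in TOKEN_BLOCK_SIZE_TABLE:
--             return TOKEN_BLOCK_SIZE_TABLE[hidden_dim]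
--
--         for dim_thresh, block_size in sorted(TOKEN_BLOCK_SIZE_TABLE.items()):
--             if hidden_dim <= dim_thresh:
--                 return block_size
--         return 1
--     else:
--         return 4
-- ===== SOURCE B (Python) =====
-- _THRESHOLDS = [128, 256, 512, 1024, 2048]
-- _BLOCKS = [24, 18, 10, 8, 4]
--
-- def layer_norm_fwd_heuristics(args):
--     hidden_dim = args["n_cols"]
--     # binary search: first index with _THRESHOLDS[idx] >= hidden_dim (bisect_left)
--     lo, hi = 0, len(_THRESHOLDS)
--     while lo < hi:
--         mid = (lo + hi) // 2
--         if _THRESHOLDS[mid] < hidden_dim: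
--             lo = mid + 1
--         else:
--             hi = mid
--     return _BLOCKS[lo] if lo < len(_THRESHOLDS) else 4
-- ===== Notes on version B (the rewrite author's own statement) =====
-- stated objective: idiomatic
-- what changed: Replaces the threshold guard, the dict membership test and the linear scan over the sorted table with a single bisect_left-style binary search over a sorted threshold list with a parallel block list.
import Mathlib
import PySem

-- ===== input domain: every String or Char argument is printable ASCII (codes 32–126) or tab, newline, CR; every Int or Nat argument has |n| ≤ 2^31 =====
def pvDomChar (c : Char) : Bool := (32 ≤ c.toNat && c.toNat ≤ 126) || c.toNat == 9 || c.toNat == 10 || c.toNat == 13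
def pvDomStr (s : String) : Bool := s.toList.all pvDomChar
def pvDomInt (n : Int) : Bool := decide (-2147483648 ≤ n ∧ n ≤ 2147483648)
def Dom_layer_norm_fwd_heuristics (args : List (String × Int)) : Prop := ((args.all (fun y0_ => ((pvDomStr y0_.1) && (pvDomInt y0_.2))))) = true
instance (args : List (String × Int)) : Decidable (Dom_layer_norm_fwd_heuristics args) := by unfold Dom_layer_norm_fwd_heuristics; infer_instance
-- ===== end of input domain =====

-- B replaces A's guard + dict membership test + linear scan by one bisect_left-style
-- binary search over a sorted threshold list (objective: more idiomatic lookup).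

-- ===== PORT A =====
def TOKEN_BLOCK_SIZE_TABLE : PySem.Dict Int Int :=
  PySem.Dict.ofList [(2048, 4), (1024, 8), (512, 10), (256, 18), (128, 24)]

-- the 'for dim_thresh, block_size in sorted(...)' loop with its early return
def pvScanA (hidden_dim : Int) : List (Int × Int) → Int
  | [] => 1
  | (dim_thresh, block_size) :: rest =>
      if hidden_dim ≤ dim_thresh then block_size else pvScanA hidden_dim rest

def layer_norm_fwd_heuristics (args : List (String × Int)) : Int :=
  match (PySem.Dict.mk args).get? "n_cols" with
  | none => 0  -- KeyError in Python; excluded by Pre_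
  | some hidden_dim =>
    if hidden_dim ≤ 2048 then
      match TOKEN_BLOCK_SIZE_TABLE.get? hidden_dim with
      | some b => b
      | none =>
          -- sorted(table.items()): keys are distinct, so sorting pairs
          -- lexicographically equals sorting by the key (exact here)
          pvScanA hidden_dim (PySem.List.sorted TOKEN_BLOCK_SIZE_TABLE.items (fun p => p.1) false)
    else 4

-- ===== PORT B =====
def pvThresholds : List Int := [128, 256, 512, 1024, 2048]
def pvBlocks : List Int := [24, 18, 10, 8, 4]

-- the while-loop binary search (bisect_left)
def pvBisect (x : Int) (lo hi : Nat) : Nat :=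
  if h : lo < hi then
    let mid := (lo + hi) / 2
    if pvThresholds.getD mid 0 < x then pvBisect x (mid + 1) hi else pvBisect x lo mid
  else lo
termination_by hi - lo
decreasing_by all_goals omega

def layer_norm_fwd_heuristics_alt (args : List (String × Int)) : Int :=
  match (PySem.Dict.mk args).get? "n_cols" with
  | none => 0  -- KeyError in Python; excluded by Pre_
  | some hidden_dim =>
    let lo := pvBisect hidden_dim 0 pvThresholds.length
    if lo < pvThresholds.length then pvBlocks.getD lo 0 else 4

-- ===== PRECONDITION & SPEC =====
-- Pre_ excludes exactly the inputs where Python A raises KeyError: no "n_cols" key.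
def Pre_layer_norm_fwd_heuristics (args : List (String × Int)) : Prop :=
  ((PySem.Dict.mk args).get? "n_cols").isSome = true
instance (args : List (String × Int)) : Decidable (Pre_layer_norm_fwd_heuristics args) := by
  unfold Pre_layer_norm_fwd_heuristics; infer_instance

def pvWitness_layer_norm_fwd_heuristics : (List (String × Int)) := [("n_cols", 300)]

def Spec_layer_norm_fwd_heuristics (args : List (String × Int)) (out : Int) : Prop := out = layer_norm_fwd_heuristics_alt args
instance (args : List (String × Int)) (out : Int) : Decidable (Spec_layer_norm_fwd_heuristics args out) := by unfold Spec_layer_norm_fwd_heuristics; infer_instance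

-- ===== CLAIM (what is proved, stated in full; the proofs are below) =====
def Claim_equal_layer_norm_fwd_heuristics : Prop := ∀ (args : List (String × Int)), Dom_layer_norm_fwd_heuristics args → Pre_layer_norm_fwd_heuristics args → Spec_layer_norm_fwd_heuristics args (layer_norm_fwd_heuristics args)

-- ===== LEMMAS AND PROOFS =====

lemma pvBisect_eval (hd : Int) :
    pvBisect hd 0 5 = if hd ≤ 128 then 0 else if hd ≤ 256 then 1 else
      if hd ≤ 512 then 2 else if hd ≤ 1024 then 3 else if hd ≤ 2048 then 4 else 5 := by
  simp [pvBisect, pvThresholds]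
  split_ifs <;> omega

lemma pv_body_eq (hd : Int) :
    (if hd ≤ 2048 then
      match TOKEN_BLOCK_SIZE_TABLE.get? hd with
      | some b => b
      | none => pvScanA hd (PySem.List.sorted TOKEN_BLOCK_SIZE_TABLE.items (fun p => p.1) false)
     else 4)
    = (let lo := pvBisect hd 0 pvThresholds.length
       if lo < pvThresholds.length then pvBlocks.getD lo 0 else (4 : Int)) := by
  have h5 : pvThresholds.length = 5 := rfl
  rcases eq_or_ne hd 2048 with rfl | n1
  · rw [h5, pvBisect_eval]; decide
  rcases eq_or_ne hd 1024 with rfl | n2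
  · rw [h5, pvBisect_eval]; decide
  rcases eq_or_ne hd 512 with rfl | n3
  · rw [h5, pvBisect_eval]; decide
  rcases eq_or_ne hd 256 with rfl | n4
  · rw [h5, pvBisect_eval]; decide
  rcases eq_or_ne hd 128 with rfl | n5
  · rw [h5, pvBisect_eval]; decide
  have hs : PySem.List.sorted TOKEN_BLOCK_SIZE_TABLE.items (fun p => p.1) false
      = [(128, 24), (256, 18), (512, 10), (1024, 8), (2048, 4)] := by decide
  have ht : TOKEN_BLOCK_SIZE_TABLE
      = PySem.Dict.mk [(2048, 4), (1024, 8), (512, 10), (256, 18), (128, 24)] := by decide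
  have b1 : ((2048 : Int) == hd) = false := beq_eq_false_iff_ne.mpr (Ne.symm n1)
  have b2 : ((1024 : Int) == hd) = false := beq_eq_false_iff_ne.mpr (Ne.symm n2)
  have b3 : ((512 : Int) == hd) = false := beq_eq_false_iff_ne.mpr (Ne.symm n3)
  have b4 : ((256 : Int) == hd) = false := beq_eq_false_iff_ne.mpr (Ne.symm n4)
  have b5 : ((128 : Int) == hd) = false := beq_eq_false_iff_ne.mpr (Ne.symm n5)
  rw [h5, pvBisect_eval]
  simp only [ht, pvBlocks, PySem.Dict.get?, List.find?, b1, b2, b3, b4, b5, Option.map_none]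
  split_ifs <;> simp_all [pvScanA] <;> first | omega | (split_ifs <;> omega)

theorem layer_norm_fwd_heuristics_spec : Claim_equal_layer_norm_fwd_heuristics := by
  intro args _ hpre
  unfold Spec_layer_norm_fwd_heuristics layer_norm_fwd_heuristics layer_norm_fwd_heuristics_alt
  cases h : (PySem.Dict.mk args).get? "n_cols" with
  | none => simp [Pre_layer_norm_fwd_heuristics, h] at hpre
  | some hd => exact pv_body_eq hd
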